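-- pv_equiv track=rewrite | github.com/dkanzariya/Python | CF_4.py | sum_of_scores
-- ===== SOURCE A (Python) =====
-- MOD = 998244353
--
-- def sum_of_scores(n, a):
--     max_a = [0] * n
--     stack = []
--
--     for i in range(n):
--         while stack and a[i] > a[stack[-1]]:
--             stack.pop()
--         if stack:
--             max_a[i] = max_a[stack[-1]] + 1
--         else:
--             max_a[i] = 0
--         stack.append(i)
--
--     ans = 0
--     for i in range(n):
--         ans += max(a[i], max_a[i]) % MOD
--
--     return ans % MOD
-- ===== SOURCE B (Python) =====
-- MOD = 998244353
--
-- def sum_of_scores(n, a):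
--     depth = []
--     ans = 0
--     for i in range(n):
--         d = 0
--         for j in range(i - 1, -1, -1):
--             if a[j] >= a[i]:
--                 d = depth[j] + 1
--                 break
--         depth.append(d)
--         ans += max(a[i], d) % MOD
--     return ans % MOD
-- ===== Notes on version B (the rewrite author's own statement) =====
-- stated objective: simpler
-- what changed: Replaced the monotonic stack and the separate second summation loop by a single pass that finds each element's nearest previous index j with a[j] >= a[i] via a direct backward scan (depth[i] = depth[j] + 1) and accumulates the answer as it goes.
import Mathlib
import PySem

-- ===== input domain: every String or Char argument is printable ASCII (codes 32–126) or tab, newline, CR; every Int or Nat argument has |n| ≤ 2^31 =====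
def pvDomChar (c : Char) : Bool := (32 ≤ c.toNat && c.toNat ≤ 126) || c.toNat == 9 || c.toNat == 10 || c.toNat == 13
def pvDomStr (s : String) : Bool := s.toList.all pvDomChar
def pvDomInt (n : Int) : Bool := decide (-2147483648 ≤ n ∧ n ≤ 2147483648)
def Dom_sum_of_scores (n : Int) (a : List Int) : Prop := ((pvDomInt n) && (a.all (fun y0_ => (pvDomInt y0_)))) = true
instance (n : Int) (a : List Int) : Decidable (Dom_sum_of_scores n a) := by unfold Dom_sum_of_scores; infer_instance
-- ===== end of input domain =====

-- B drops A's monotonic stack and second loop: one pass with a direct backward scan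
-- for the nearest previous element ≥ a[i] (simpler decomposition, not faster).

def aMOD : Int := 998244353

-- ===== PORT A =====
-- the 'while stack and a[i] > a[stack[-1]]: stack.pop()' loop; stack is kept top-first
-- (head = Python stack[-1], push = cons, pop = tail); a[j] is ported as a.getD j 0,
-- exact because every index used is in range under Pre_.
def pvPopA (a : List Int) (c : Int) : List Nat → List Nat
  | [] => []
  | t :: rest => if c > a.getD t 0 then pvPopA a c rest else t :: rest

-- state (max_a, stack) of A's first for-loop after i iterations (indices 0..i-1 done)
def aLoop1 (a : List Int) (m0 : Nat) : Nat → List Int × List Nat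
  | 0 => (List.replicate m0 0, [])
  | i+1 =>
    let s := aLoop1 a m0 i
    let stack' := pvPopA a (a.getD i 0) s.2
    let v : Int := match stack' with
      | [] => 0
      | t :: _ => s.1.getD t 0 + 1
    (s.1.set i v, i :: stack')

-- A's second for-loop: ans after i iterations
def aLoop2 (a mA : List Int) : Nat → Int
  | 0 => 0
  | i+1 => aLoop2 a mA i + PySem.Int.mod (max (a.getD i 0) (mA.getD i 0)) aMOD

def sum_of_scores (n : Int) (a : List Int) : Int :=
  let m := n.toNat   -- range(n) is empty for n ≤ 0
  let s := aLoop1 a m m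
  PySem.Int.mod (aLoop2 a s.1 m) aMOD

-- ===== PORT B =====
-- Source B's inner 'for j in range(i-1, -1, -1): if a[j] >= a[i]: d = depth[j] + 1; break'
def pvFindB (a : List Int) (c : Int) (depth : List Int) : Nat → Int
  | 0 => 0
  | j+1 => if a.getD j 0 ≥ c then depth.getD j 0 + 1 else pvFindB a c depth j

-- state (depth, ans) of Source B's single loop after i iterations
def bLoop (a : List Int) : Nat → List Int × Int
  | 0 => ([], 0)
  | i+1 =>
    let s := bLoop a i
    let d := pvFindB a (a.getD i 0) s.1 i
    (s.1 ++ [d], s.2 + PySem.Int.mod (max (a.getD i 0) d) aMOD)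

def sum_of_scores_alt (n : Int) (a : List Int) : Int :=
  PySem.Int.mod (bLoop a n.toNat).2 aMOD

-- ===== PRECONDITION & SPEC =====
-- Pre_ excludes exactly n > len(a), where Python A (and B) raise IndexError at a[i].
def Pre_sum_of_scores (n : Int) (a : List Int) : Prop := n ≤ (a.length : Int)
instance (n : Int) (a : List Int) : Decidable (Pre_sum_of_scores n a) := by unfold Pre_sum_of_scores; infer_instance
def pvWitness_sum_of_scores : Int × List Int := (3, [2, 1, 2])
def Spec_sum_of_scores (n : Int) (a : List Int) (out : Int) : Prop := out = sum_of_scores_alt n a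
instance (n : Int) (a : List Int) (out : Int) : Decidable (Spec_sum_of_scores n a out) := by unfold Spec_sum_of_scores; infer_instance

-- ===== CLAIM (what is proved, stated in full; the proofs are below) =====
def Claim_equal_sum_of_scores : Prop := ∀ (n : Int) (a : List Int), Dom_sum_of_scores n a → Pre_sum_of_scores n a → Spec_sum_of_scores n a (sum_of_scores n a)

-- ===== LEMMAS AND PROOFS =====

-- the stack A maintains, characterised recursively (top-first)
def stkSpec (a : List Int) : Nat → List Nat
  | 0 => []
  | i+1 => i :: (stkSpec a i).filter (fun j => decide (a.getD i 0 ≤ a.getD j 0))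

-- first index j < i (scanning downward) with a[j] ≥ c
def firstGe (a : List Int) (c : Int) : Nat → Option Nat
  | 0 => none
  | j+1 => if c ≤ a.getD j 0 then some j else firstGe a c j

-- the depth B computes at step i
def Dpt (a : List Int) (i : Nat) : Int := (bLoop a (i+1)).1.getD i 0

-- the common running sum
def sumD (a : List Int) : Nat → Int
  | 0 => 0
  | i+1 => sumD a i + PySem.Int.mod (max (a.getD i 0) (Dpt a i)) aMOD

theorem bLoop_len (a : List Int) : ∀ i, (bLoop a i).1.length = i
  | 0 => rfl
  | i+1 => by
    show ((bLoop a i).1 ++ [_]).length = i + 1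
    simp [bLoop_len a i]

theorem concat_getD (l : List Int) (x : Int) (i : Nat) (h : l.length = i) :
    (l ++ [x]).getD i 0 = x := by
  subst h
  rw [List.getD_eq_getElem?_getD, List.getElem?_concat_length]
  rfl

theorem Dpt_eq (a : List Int) (i : Nat) :
    Dpt a i = pvFindB a (a.getD i 0) (bLoop a i).1 i := by
  unfold Dpt
  show ((bLoop a i).1 ++ [pvFindB a (a.getD i 0) (bLoop a i).1 i]).getD i 0 = _
  exact concat_getD _ _ _ (bLoop_len a i)

theorem bLoop_fst (a : List Int) : ∀ i, (bLoop a i).1 = (List.range i).map (Dpt a)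
  | 0 => rfl
  | i+1 => by
    show (bLoop a i).1 ++ [pvFindB a (a.getD i 0) (bLoop a i).1 i] = _
    rw [← Dpt_eq a i, bLoop_fst a i, List.range_succ, List.map_append]
    rfl

theorem bLoop_snd (a : List Int) : ∀ i, (bLoop a i).2 = sumD a i
  | 0 => rfl
  | i+1 => by
    show (bLoop a i).2 + PySem.Int.mod (max (a.getD i 0) (pvFindB a (a.getD i 0) (bLoop a i).1 i)) aMOD = _
    rw [← Dpt_eq, bLoop_snd a i]
    rfl

theorem firstGe_lt (a : List Int) (c : Int) : ∀ i j, firstGe a c i = some j → j < i := by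
  intro i
  induction i with
  | zero => intro j h; simp [firstGe] at h
  | succ i ih =>
    intro j h
    unfold firstGe at h
    split at h
    · cases h; omega
    · exact Nat.lt_succ_of_lt (ih j h)

theorem stk_pairwise (a : List Int) :
    ∀ i, (stkSpec a i).Pairwise (fun x y => a.getD x 0 ≤ a.getD y 0) := by
  intro i
  induction i with
  | zero => exact List.Pairwise.nil
  | succ i ih =>
    unfold stkSpec
    refine List.Pairwise.cons ?_ (ih.sublist List.filter_sublist)
    intro y hy
    exact of_decide_eq_true (List.mem_filter.mp hy).2

theorem pop_filter (a : List Int) (c : Int) :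
    ∀ l : List Nat, l.Pairwise (fun x y => a.getD x 0 ≤ a.getD y 0) →
      pvPopA a c l = l.filter (fun j => decide (c ≤ a.getD j 0)) := by
  intro l
  induction l with
  | nil => intro _; rfl
  | cons t rest ih =>
    intro hp
    rcases List.pairwise_cons.mp hp with ⟨h1, h2⟩
    by_cases hc : c > a.getD t 0
    · have hdec : decide (c ≤ a.getD t 0) = false :=
        decide_eq_false_iff_not.mpr (not_le.mpr hc)
      simp only [pvPopA, if_pos hc, List.filter_cons, hdec, ih h2]
      simp
    · have ht : c ≤ a.getD t 0 := le_of_not_gt hc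
      have hdec : decide (c ≤ a.getD t 0) = true := decide_eq_true ht
      simp only [pvPopA, if_neg hc, List.filter_cons, hdec, if_pos]
      rw [List.filter_eq_self.mpr]
      intro x hx
      exact decide_eq_true (le_trans ht (h1 x hx))

theorem head_filter (a : List Int) : ∀ (i : Nat) (c : Int),
    ((stkSpec a i).filter (fun j => decide (c ≤ a.getD j 0))).head? = firstGe a c i := by
  intro i
  induction i with
  | zero => intro c; rfl
  | succ i ih =>
    intro c
    unfold stkSpec firstGe
    by_cases h : c ≤ a.getD i 0
    · have h' : c ≤ a[i]?.getD 0 := h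
      simp [h']
    · have h' : ¬ c ≤ a[i]?.getD 0 := h
      have hd : decide (c ≤ a.getD i 0) = false := decide_eq_false_iff_not.mpr h
      rw [List.filter_cons]
      simp only [hd, Bool.false_eq_true, if_false, if_neg h]
      rw [List.filter_filter, ← ih c]
      congr 1
      apply List.filter_congr
      intro j _
      by_cases hj : c ≤ a.getD j 0
      · have h2 : a.getD i 0 ≤ a.getD j 0 := le_trans (le_of_lt (lt_of_not_ge h)) hj
        rw [decide_eq_true hj, decide_eq_true h2]
        rfl
      · rw [decide_eq_false_iff_not.mpr hj]
        simp

theorem findB_eq (a : List Int) (c : Int) : ∀ (i : Nat) (dl : List Int),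
    pvFindB a c dl i = (match firstGe a c i with | none => 0 | some j => dl.getD j 0 + 1) := by
  intro i
  induction i with
  | zero => intro dl; rfl
  | succ i ih =>
    intro dl
    unfold pvFindB firstGe
    by_cases h : c ≤ a.getD i 0
    · have h' : c ≤ a[i]?.getD 0 := h
      simp [ge_iff_le, h']
    · have h' : ¬ c ≤ a[i]?.getD 0 := h
      simp [ge_iff_le, h', ih dl]

theorem Dpt_some (a : List Int) (i t : Nat) (ht : t < i)
    (h : firstGe a (a.getD i 0) i = some t) : Dpt a i = Dpt a t + 1 := by
  rw [Dpt_eq, findB_eq, h]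
  have hg : (bLoop a i).1.getD t 0 = Dpt a t := by
    rw [bLoop_fst a i]
    simp [List.getD_eq_getElem?_getD, ht]
  show (bLoop a i).1.getD t 0 + 1 = Dpt a t + 1
  rw [hg]

theorem aLoop1_inv (a : List Int) (m0 : Nat) : ∀ i, i ≤ m0 →
    (aLoop1 a m0 i).1.length = m0 ∧ (aLoop1 a m0 i).2 = stkSpec a i ∧
      ∀ j, j < i → (aLoop1 a m0 i).1.getD j 0 = Dpt a j := by
  intro i
  induction i with
  | zero =>
    intro _
    exact ⟨List.length_replicate, rfl, fun j h => absurd h (Nat.not_lt_zero j)⟩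
  | succ i ih =>
    intro hi
    obtain ⟨hl, hs, he⟩ := ih (Nat.le_of_succ_le hi)
    have hstk : pvPopA a (a.getD i 0) (aLoop1 a m0 i).2
        = (stkSpec a i).filter (fun j => decide (a.getD i 0 ≤ a.getD j 0)) := by
      rw [hs]; exact pop_filter a _ _ (stk_pairwise a i)
    have hv : (match pvPopA a (a.getD i 0) (aLoop1 a m0 i).2 with
        | [] => (0 : Int)
        | t :: _ => (aLoop1 a m0 i).1.getD t 0 + 1) = Dpt a i := by
      cases hfg : firstGe a (a.getD i 0) i with
      | none =>
        have : pvPopA a (a.getD i 0) (aLoop1 a m0 i).2 = [] := by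
          rw [hstk]
          exact List.head?_eq_none_iff.mp (by rw [head_filter]; exact hfg)
        rw [this, Dpt_eq, findB_eq, hfg]
      | some t =>
        have hh : (pvPopA a (a.getD i 0) (aLoop1 a m0 i).2).head? = some t := by
          rw [hstk, head_filter]; exact hfg
        have htl : t < i := firstGe_lt a _ i t hfg
        cases hpp : pvPopA a (a.getD i 0) (aLoop1 a m0 i).2 with
        | nil => rw [hpp] at hh; simp at hh
        | cons t' tl =>
          rw [hpp] at hh
          simp only [List.head?_cons, Option.some.injEq] at hh
          show (aLoop1 a m0 i).1.getD t' 0 + 1 = Dpt a i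
          rw [hh, he t htl, Dpt_some a i t htl hfg]
    refine ⟨?_, ?_, ?_⟩
    · show ((aLoop1 a m0 i).1.set i _).length = m0
      rw [List.length_set, hl]
    · show (i :: pvPopA a (a.getD i 0) (aLoop1 a m0 i).2) = stkSpec a (i+1)
      rw [hstk]; rfl
    · intro j hj
      show ((aLoop1 a m0 i).1.set i _).getD j 0 = Dpt a j
      rcases Nat.lt_succ_iff_lt_or_eq.mp hj with hj' | hj'
      · rw [List.getD_eq_getElem?_getD, List.getElem?_set_ne (by omega),
          ← List.getD_eq_getElem?_getD]
        exact he j hj'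
      · subst hj'
        rw [List.getD_eq_getElem?_getD, List.getElem?_set_self (by omega)]
        exact hv

theorem aLoop2_eq (a mA : List Int) (m : Nat) (h : ∀ j, j < m → mA.getD j 0 = Dpt a j) :
    ∀ i, i ≤ m → aLoop2 a mA i = sumD a i := by
  intro i
  induction i with
  | zero => intro _; rfl
  | succ i ih =>
    intro hi
    show aLoop2 a mA i + _ = _
    rw [ih (Nat.le_of_succ_le hi), h i (by omega)]
    rfl

-- ===== VERDICT (by name: the statement is the Claim_ definition above) =====
theorem sum_of_scores_spec : Claim_equal_sum_of_scores := by
  intro n a _ _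
  have h := aLoop1_inv a n.toNat n.toNat le_rfl
  show PySem.Int.mod (aLoop2 a (aLoop1 a n.toNat n.toNat).1 n.toNat) aMOD =
    PySem.Int.mod (bLoop a n.toNat).2 aMOD
  rw [aLoop2_eq a _ n.toNat h.2.2 n.toNat le_rfl, bLoop_snd]
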